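-- pv_equiv track=rewrite | github.com/zibochen6/personal_scripts_repository | video-subtitle-extractor/extractor/bilibili_extractor.py | _pick_best_format
-- ===== SOURCE A (Python) =====
-- from typing import Any, Sequence
--
-- def _pick_best_format(entries: Sequence[dict[str, Any]]) -> dict[str, str] | None:
--     """Choose the most useful subtitle serialization format."""
--
--     for preferred in ("json", "json3", "vtt", "srt"):
--         for entry in entries:
--             format_name = str(entry.get("ext") or entry.get("format_id") or "")
--             if format_name != preferred:
--                 continue
--             url = entry.get("url")
--             if url:
--                 return {"url": str(url), "format": format_name}
--     for entry in entries:
--         url = entry.get("url")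
--         if url:
--             return {
--                 "url": str(url),
--                 "format": str(entry.get("ext") or entry.get("format_id") or "unknown"),
--             }
--     return None
-- ===== SOURCE B (Python) =====
-- def _pick_best_format(entries):
--     """Choose the most useful subtitle serialization format."""
--     by_format = {}
--     fallback = None
--     for entry in entries:
--         url = entry.get("url")
--         if not url:
--             continue
--         name = str(entry.get("ext") or entry.get("format_id") or "")
--         if name not in by_format:
--             by_format[name] = {"url": str(url), "format": name}
--         if fallback is None:
--             fallback = {
--                 "url": str(url),
--                 "format": str(entry.get("ext") or entry.get("format_id") or "unknown"),
--             }
--     for preferred in ("json", "json3", "vtt", "srt"):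
--         if preferred in by_format:
--             return by_format[preferred]
--     return fallback
-- ===== Notes on version B (the rewrite author's own statement) =====
-- stated objective: alternative
-- what changed: Replaces A's four restarted scans of the entry list (one per preference) plus a separate fallback scan by a single pass that builds a dict mapping each format name to the first url-bearing entry's record while tracking the first url-bearing entry as a fallback, then walks the preference tuple over the dict.
import Mathlib
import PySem

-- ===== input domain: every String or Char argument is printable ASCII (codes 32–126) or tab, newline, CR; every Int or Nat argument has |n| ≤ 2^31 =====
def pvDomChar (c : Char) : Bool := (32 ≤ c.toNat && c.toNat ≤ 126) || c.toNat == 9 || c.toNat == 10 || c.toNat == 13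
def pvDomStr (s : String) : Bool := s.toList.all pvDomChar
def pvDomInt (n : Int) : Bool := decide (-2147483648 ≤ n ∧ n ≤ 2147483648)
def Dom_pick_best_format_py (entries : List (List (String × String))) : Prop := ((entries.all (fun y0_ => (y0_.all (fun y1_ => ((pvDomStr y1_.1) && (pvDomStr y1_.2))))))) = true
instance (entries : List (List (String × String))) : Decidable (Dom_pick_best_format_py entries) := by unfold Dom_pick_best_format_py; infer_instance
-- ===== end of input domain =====

-- B replaces A's four restarted scans (one per preference) plus a fallback scan by ONE pass
-- building a first-entry-per-format dict and a first-url fallback; objective: alternative decomposition.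

-- shared helpers (both Pythons contain these very expressions)
-- entry.get(k): first match in the association list (Python dict lookup)
def pvGet (e : List (String × String)) (k : String) : Option String := (PySem.Dict.mk e).get? k
-- Python `o or dflt` on an optional string (None and "" are falsy)
def pvOr (o : Option String) (dflt : String) : String :=
  match o with
  | some s => if s = "" then dflt else s
  | none => dflt
-- str(entry.get("ext") or entry.get("format_id") or dflt)
def pvFmt (e : List (String × String)) (dflt : String) : String :=
  pvOr (pvGet e "ext") (pvOr (pvGet e "format_id") dflt)
-- entry.get("url"), with "" standing for the falsy None/"" cases
def pvUrl (e : List (String × String)) : String := (pvGet e "url").getD ""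

-- ===== PORT A =====
-- inner loop: `for entry in entries:` under one fixed `preferred`
def pvAScan (preferred : String) : List (List (String × String)) → Option (List (String × String))
  | [] => none
  | e :: rest =>
    let format_name := pvFmt e ""
    if format_name ≠ preferred then pvAScan preferred rest
    else
      let url := pvUrl e
      if url ≠ "" then some [("url", url), ("format", format_name)]
      else pvAScan preferred rest

-- outer loop: `for preferred in ("json", "json3", "vtt", "srt"):`
def pvAOuter (entries : List (List (String × String))) : List String → Option (List (String × String))
  | [] => none
  | p :: ps =>
    match pvAScan p entries with
    | some r => some r
    | none => pvAOuter entries ps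

-- final fallback loop
def pvAFallback : List (List (String × String)) → Option (List (String × String))
  | [] => none
  | e :: rest =>
    let url := pvUrl e
    if url ≠ "" then some [("url", url), ("format", pvFmt e "unknown")]
    else pvAFallback rest

def pick_best_format_py (entries : List (List (String × String))) : Option (List (String × String)) :=
  match pvAOuter entries ["json", "json3", "vtt", "srt"] with
  | some r => some r
  | none => pvAFallback entries

-- ===== PORT B =====
-- one step of B's single pass: state = (by_format dict, fallback)
def pvBStep (acc : PySem.Dict String (List (String × String)) × Option (List (String × String)))
    (e : List (String × String)) :
    PySem.Dict String (List (String × String)) × Option (List (String × String)) :=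
  let url := pvUrl e
  if url = "" then acc
  else
    let name := pvFmt e ""
    let d := if acc.1.contains name then acc.1 else acc.1.insert name [("url", url), ("format", name)]
    let fb :=
      match acc.2 with
      | some v => some v
      | none => some [("url", url), ("format", pvFmt e "unknown")]
    (d, fb)

-- `for preferred in (...): if preferred in by_format: return by_format[preferred]`
def pvBPref (d : PySem.Dict String (List (String × String))) : List String → Option (List (String × String))
  | [] => none
  | p :: ps =>
    match d.get? p with
    | some v => some v
    | none => pvBPref d ps

def pick_best_format_py_alt (entries : List (List (String × String))) : Option (List (String × String)) :=
  match pvBPref (entries.foldl pvBStep (PySem.Dict.empty, none)).1 ["json", "json3", "vtt", "srt"] with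
  | some v => some v
  | none => (entries.foldl pvBStep (PySem.Dict.empty, none)).2

-- ===== PRECONDITION & SPEC =====
def Spec_pick_best_format_py (entries : List (List (String × String))) (out : Option (List (String × String))) : Prop := out = pick_best_format_py_alt entries
instance (entries : List (List (String × String))) (out : Option (List (String × String))) : Decidable (Spec_pick_best_format_py entries out) := by unfold Spec_pick_best_format_py; infer_instance

-- ===== CLAIM (what is proved, stated in full; the proofs are below) =====
def Claim_equal_pick_best_format_py : Prop := ∀ (entries : List (List (String × String))), Dom_pick_best_format_py entries → Spec_pick_best_format_py entries (pick_best_format_py entries)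

-- ===== LEMMAS AND PROOFS =====

-- B's dict, looked up at p, is exactly A's inner scan for preference p (generalized over the accumulator)
theorem pvFold_fst_get (p : String) :
    ∀ (entries : List (List (String × String)))
      (acc : PySem.Dict String (List (String × String)) × Option (List (String × String))),
      ((entries.foldl pvBStep acc).1).get? p =
        match acc.1.get? p with
        | some v => some v
        | none => pvAScan p entries := by
  intro entries
  induction entries with
  | nil => intro acc; cases h : acc.1.get? p <;> simp [pvAScan, h]
  | cons e rest ih =>
    intro acc
    simp only [List.foldl_cons, ih]
    by_cases hu : pvUrl e = ""
    · simp only [pvBStep, hu]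
      cases h : acc.1.get? p <;> simp [pvAScan, h, hu]
    · simp only [pvBStep, if_neg hu]
      by_cases hc : acc.1.contains (pvFmt e "") = true
      · -- key already present: dict unchanged; acc.1.get? (pvFmt e "") is some, so if p = name,
        -- acc branch decides; compare with pvAScan on e
        simp only [hc]
        by_cases hp : pvFmt e "" = p
        · have : (acc.1.get? p).isSome := by
            rw [← hp, ← PySem.Dict.contains_eq_isSome_get?]; exact hc
          obtain ⟨v, hv⟩ := Option.isSome_iff_exists.mp this
          simp [hv]
        · cases h : acc.1.get? p <;> simp [pvAScan, h, hp]
      · rw [if_neg hc]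
        by_cases hp : pvFmt e "" = p
        · have hnone : acc.1.get? p = none := by
            rw [← hp, ← Option.not_isSome_iff_eq_none, ← PySem.Dict.contains_eq_isSome_get?]
            simp [hc]
          rw [hp, PySem.Dict.get?_insert_self]
          simp [hnone, pvAScan, hp, hu]
        · rw [PySem.Dict.get?_insert_of_ne _ _ (fun h => hp h.symm)]
          cases h : acc.1.get? p <;> simp [pvAScan, h, hp]

-- B's fallback component is A's fallback scan (generalized over the accumulator)
theorem pvFold_snd :
    ∀ (entries : List (List (String × String)))
      (acc : PySem.Dict String (List (String × String)) × Option (List (String × String))),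
      (entries.foldl pvBStep acc).2 =
        match acc.2 with
        | some v => some v
        | none => pvAFallback entries := by
  intro entries
  induction entries with
  | nil => intro acc; cases h : acc.2 <;> simp [pvAFallback, h]
  | cons e rest ih =>
    intro acc
    simp only [List.foldl_cons, ih]
    by_cases hu : pvUrl e = ""
    · simp only [pvBStep, hu]
      cases h : acc.2 <;> simp [pvAFallback, h, hu]
    · simp only [pvBStep, if_neg hu]
      cases h : acc.2 <;> simp [pvAFallback, h, hu]

-- the preference walk over B's dict equals A's outer loop
theorem pvPref_eq (entries : List (List (String × String))) :
    ∀ (ps : List String),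
      pvBPref (entries.foldl pvBStep (PySem.Dict.empty, none)).1 ps = pvAOuter entries ps := by
  intro ps
  induction ps with
  | nil => rfl
  | cons p ps ih =>
    simp only [pvBPref, pvAOuter, ih, pvFold_fst_get p entries (PySem.Dict.empty, none),
      PySem.Dict.get?_empty]

-- ===== VERDICT (by name: the statement is the Claim_ definition above) =====
theorem pick_best_format_py_spec : Claim_equal_pick_best_format_py := by
  intro entries _
  unfold Spec_pick_best_format_py pick_best_format_py pick_best_format_py_alt
  rw [pvPref_eq entries]
  cases h : pvAOuter entries ["json", "json3", "vtt", "srt"] with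
  | some r => simp
  | none =>
    simp only
    rw [pvFold_snd entries (PySem.Dict.empty, none)]
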